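-- pv_equiv track=rewrite | github.com/night-crawler/rfnumplan | utils.py | range_to_prefix
-- ===== SOURCE A (Python) =====
-- def range_to_prefix(a, b):
--     def inner(aa, bb, p):
--         if p == 1:
--             if a <= aa <= b:
--                 yield aa
--             return
--
--         for d in range(aa, bb + 1, p):
--             if a <= d and d + p - 1 <= b:
--                 yield d // p
--             elif not (bb < a or aa > b):
--                 for i in range(10):
--                     yield from inner(d + i * p // 10, d + (i + 1) * p // 10 - 1, p // 10)
--
--     a, b = int(a), int(b)
--     p = 10**(max(len(str(x)) for x in (a, b)) - 1)
--     yield from inner(a // p * p, b // p * p + p - 1, p)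
-- ===== SOURCE B (Python) =====
-- def range_to_prefix(a, b):
--     # Greedy sweep: walk lo from a to b, each step emitting the largest
--     # aligned power-of-ten block that starts at lo and fits inside [a, b].
--     a, b = int(a), int(b)
--     p = 10 ** (max(len(str(a)), len(str(b))) - 1)
--     lo = a
--     while lo <= b:
--         s = p
--         while lo % s != 0 or lo + s - 1 > b:
--             s //= 10
--         yield lo // s
--         lo += s
-- ===== Notes on version B (the rewrite author's own statement) =====
-- stated objective: simpler
-- what changed: Replaces A's recursive 10-way digit subdivision (generator recursing into all ten sub-blocks of every non-fitting block) with a single iterative greedy sweep that, at each position lo, emits the largest aligned power-of-ten block starting at lo that fits in [a,b].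
-- intended difference: For 0 <= a < b <= 9 (both endpoints single-digit, so A's block size is 1), A yields only [a] and silently drops a+1..b from the cover; B yields every digit a..b, which is the correct prefix cover of the range. — e.g. on range_to_prefix(0, 9): A returns [0], B returns [0, 1, 2, 3, 4, 5, 6, 7, 8, 9]
import Mathlib
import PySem

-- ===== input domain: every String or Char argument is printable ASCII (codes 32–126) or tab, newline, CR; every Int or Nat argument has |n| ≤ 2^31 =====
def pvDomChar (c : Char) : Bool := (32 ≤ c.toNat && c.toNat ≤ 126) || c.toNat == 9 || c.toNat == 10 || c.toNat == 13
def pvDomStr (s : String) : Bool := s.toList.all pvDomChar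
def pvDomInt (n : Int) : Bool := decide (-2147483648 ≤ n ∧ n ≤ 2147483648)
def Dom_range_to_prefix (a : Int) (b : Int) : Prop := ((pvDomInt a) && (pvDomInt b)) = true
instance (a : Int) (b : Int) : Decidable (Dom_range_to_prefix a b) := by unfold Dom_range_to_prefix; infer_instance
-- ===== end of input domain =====

-- B replaces A's recursive 10-way digit subdivision by one iterative greedy sweep
-- (largest aligned power-of-ten block at each position); objective: simpler.
-- Both Pythons are generators; the ports and the equivalence are about the yielded sequence.

-- ===== PORT A =====
-- len(str(n)), shared by both ports (str(n) is ASCII: char-list length = string length)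
def pvNumLen (n : Int) : Nat := (PySem.Int.toChars n).length

-- p = 10**(max(len(str(x)) for x in (a, b)) - 1), computed alike by both Pythons
def pvP (a b : Int) : Int := 10 ^ (max (pvNumLen a) (pvNumLen b) - 1)

-- inner(aa, bb, p): A's recursive generator; yielding = list concatenation (flatMap).
-- The fuel argument is a pure totality guard: each recursion divides p by 10, so any
-- fuel > p.toNat is never exhausted; pvInner passes p.toNat + 1.
-- The `p ≤ 1` test is Python's `p == 1` (p is always a positive power of ten).
def pvInnerF : Nat → Int → Int → Int → Int → Int → List Int
  | 0, _, _, _, _, _ => []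
  | fuel + 1, a, b, aa, bb, p =>
    if p ≤ 1 then
      if a ≤ aa ∧ aa ≤ b then [aa] else []
    else
      (PySem.List.pyRange aa (bb + 1) p).flatMap (fun d =>
        if a ≤ d ∧ d + p - 1 ≤ b then [PySem.Int.floordiv d p]
        else if ¬(bb < a ∨ aa > b) then
          (PySem.List.pyRange 0 10 1).flatMap (fun i =>
            pvInnerF fuel a b (d + PySem.Int.floordiv (i * p) 10)
                             (d + PySem.Int.floordiv ((i + 1) * p) 10 - 1)
                             (PySem.Int.floordiv p 10))
        else [])

def pvInner (a b aa bb p : Int) : List Int := pvInnerF (p.toNat + 1) a b aa bb p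

def range_to_prefix (a : Int) (b : Int) : List Int :=
  pvInner a b (PySem.Int.floordiv a (pvP a b) * pvP a b)
    (PySem.Int.floordiv b (pvP a b) * pvP a b + pvP a b - 1) (pvP a b)

-- ===== PORT B =====
-- the inner `while lo % s != 0 or lo + s - 1 > b: s //= 10` loop of Source B.
-- Fuel is a totality guard (s shrinks by /10 each step; pvFindS passes s.toNat + 1);
-- the `s ≤ 1` branch is Python's loop exit at s = 1 (both tests fail there when lo ≤ b).
def pvFindSF : Nat → Int → Int → Int → Int
  | 0, _, _, _ => 1
  | fuel + 1, b, lo, s =>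
    if s ≤ 1 then 1
    else if PySem.Int.mod lo s = 0 ∧ lo + s - 1 ≤ b then s
    else pvFindSF fuel b lo (PySem.Int.floordiv s 10)

def pvFindS (b lo s : Int) : Int := pvFindSF (s.toNat + 1) b lo s

-- the outer `while lo <= b` loop of Source B; fuel > (b + 1 - lo).toNat is a totality guard
-- (lo grows by the found block size ≥ 1 each step)
def pvSweepF : Nat → Int → Int → Int → List Int
  | 0, _, _, _ => []
  | fuel + 1, b, p, lo =>
    if lo ≤ b then
      PySem.Int.floordiv lo (pvFindS b lo p) :: pvSweepF fuel b p (lo + pvFindS b lo p)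
    else []

def pvSweep (b p lo : Int) : List Int := pvSweepF ((b + 1 - lo).toNat + 1) b p lo

def range_to_prefix_alt (a : Int) (b : Int) : List Int :=
  pvSweep b (pvP a b) a

-- ===== PRECONDITION & SPEC =====
-- For 0 ≤ a < b ≤ 9 (both endpoints single-digit, so A's block size is 1), A yields only
-- [a] and silently drops a+1..b from the cover; B yields every digit a..b, which is the
-- correct prefix cover of the range.
def D_range_to_prefix (a : Int) (b : Int) : Prop := 0 ≤ a ∧ b ≤ 9 ∧ a < b
instance (a : Int) (b : Int) : Decidable (D_range_to_prefix a b) := by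
  unfold D_range_to_prefix; infer_instance

def Spec_range_to_prefix (a : Int) (b : Int) (out : List Int) : Prop :=
  ¬ D_range_to_prefix a b → out = range_to_prefix_alt a b
instance (a : Int) (b : Int) (out : List Int) : Decidable (Spec_range_to_prefix a b out) := by
  unfold Spec_range_to_prefix; infer_instance

def pvDiffWitness_range_to_prefix : Int × Int := (0, 9)
def pvDiffWitnessOut_range_to_prefix : (List Int) × (List Int) :=
  ([0], [0, 1, 2, 3, 4, 5, 6, 7, 8, 9])

-- ===== CLAIM (what is proved, stated in full; the proofs are below) =====
def Claim_unchanged_range_to_prefix : Prop := ∀ (a : Int) (b : Int), Dom_range_to_prefix a b → Spec_range_to_prefix a b (range_to_prefix a b)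
def Claim_changed_range_to_prefix : Prop := Dom_range_to_prefix (pvDiffWitness_range_to_prefix.1) (pvDiffWitness_range_to_prefix.2) ∧ D_range_to_prefix (pvDiffWitness_range_to_prefix.1) (pvDiffWitness_range_to_prefix.2) ∧ range_to_prefix (pvDiffWitness_range_to_prefix.1) (pvDiffWitness_range_to_prefix.2) = pvDiffWitnessOut_range_to_prefix.1 ∧ range_to_prefix_alt (pvDiffWitness_range_to_prefix.1) (pvDiffWitness_range_to_prefix.2) = pvDiffWitnessOut_range_to_prefix.2 ∧ pvDiffWitnessOut_range_to_prefix.1 ≠ pvDiffWitnessOut_range_to_prefix.2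
def Claim_exact_range_to_prefix : Prop := ∀ (a : Int) (b : Int), Dom_range_to_prefix a b → D_range_to_prefix a b → range_to_prefix a b ≠ range_to_prefix_alt a b

-- ===== LEMMAS AND PROOFS =====

theorem pow10_pos (e : Nat) : (0 : Int) < 10 ^ e := pow_pos (by norm_num) e

theorem pow10_succ_ge (e : Nat) : (10 : Int) ≤ 10 ^ (e + 1) := by
  calc (10:Int) = 10 ^ 1 := (pow_one 10).symm
  _ ≤ 10 ^ (e+1) := pow_le_pow_right₀ (by norm_num) (by omega)

theorem floordiv_toNat_lt (s : Int) (hs : ¬ s ≤ 1) :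
    (PySem.Int.floordiv s 10).toNat < s.toNat := by
  have h1 : PySem.Int.floordiv s 10 < s :=
    (PySem.Int.floordiv_lt_iff_lt_mul (by norm_num)).2 (by nlinarith [show (2:Int) ≤ s by omega])
  have h0 : 0 ≤ PySem.Int.floordiv s 10 := by
    rw [PySem.Int.floordiv_eq_ediv_of_pos (by norm_num)]
    exact Int.ediv_nonneg (by omega) (by norm_num)
  omega

-- fuel irrelevance: any fuel above the measure computes the same value
theorem pvFindSF_irrel : ∀ (f g : Nat) (b lo s : Int), s.toNat < f → s.toNat < g →
    pvFindSF f b lo s = pvFindSF g b lo s := by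
  intro f
  induction f with
  | zero => omega
  | succ f ih =>
    intro g b lo s hf hg
    obtain ⟨g, rfl⟩ : ∃ g', g = g' + 1 := ⟨g - 1, by omega⟩
    simp only [pvFindSF]
    split
    · rfl
    · split
      · rfl
      · rename_i hs _
        exact ih g b lo _ (by have := floordiv_toNat_lt s hs; omega)
                          (by have := floordiv_toNat_lt s hs; omega)

theorem pvFindS_unfold (b lo s : Int) :
    pvFindS b lo s =
      if s ≤ 1 then 1
      else if PySem.Int.mod lo s = 0 ∧ lo + s - 1 ≤ b then s
      else pvFindS b lo (PySem.Int.floordiv s 10) := by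
  show pvFindSF (s.toNat + 1) b lo s = _
  simp only [pvFindSF]
  split
  · rfl
  · split
    · rfl
    · rename_i hs _
      exact pvFindSF_irrel _ _ b lo _ (by have := floordiv_toNat_lt s hs; omega)
                                      (by omega)

theorem pvFindS_one_le (b lo s : Int) : 1 ≤ pvFindS b lo s := by
  show 1 ≤ pvFindSF (s.toNat + 1) b lo s
  generalize hf : s.toNat + 1 = f
  have hlt : s.toNat < f := by omega
  clear hf
  induction f generalizing s with
  | zero => omega
  | succ f ih =>
    simp only [pvFindSF]
    split
    · omega
    · split
      · omega
      · rename_i hs _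
        exact ih _ (by have := floordiv_toNat_lt s hs; omega)

theorem pvSweepF_irrel : ∀ (f g : Nat) (b p lo : Int), (b + 1 - lo).toNat < f →
    (b + 1 - lo).toNat < g → pvSweepF f b p lo = pvSweepF g b p lo := by
  intro f
  induction f with
  | zero => omega
  | succ f ih =>
    intro g b p lo hf hg
    obtain ⟨g, rfl⟩ : ∃ g', g = g' + 1 := ⟨g - 1, by omega⟩
    simp only [pvSweepF]
    split
    · rename_i hlb
      have hs := pvFindS_one_le b lo p
      rw [ih g b p _ (by omega) (by omega)]
    · rfl

theorem pvSweep_cons {b p lo : Int} (h : lo ≤ b) :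
    pvSweep b p lo =
      PySem.Int.floordiv lo (pvFindS b lo p) :: pvSweep b p (lo + pvFindS b lo p) := by
  show pvSweepF ((b + 1 - lo).toNat + 1) b p lo = _
  simp only [pvSweepF, if_pos h]
  congr 1
  exact pvSweepF_irrel _ _ b p _ (by have := pvFindS_one_le b lo p; omega) (by omega)

theorem pvSweep_nil {b p lo : Int} (h : ¬ lo ≤ b) : pvSweep b p lo = [] := by
  show pvSweepF ((b + 1 - lo).toNat + 1) b p lo = _
  simp only [pvSweepF, if_neg h]

theorem pvInnerF_irrel : ∀ (f g : Nat) (a b aa bb p : Int), p.toNat < f → p.toNat < g →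
    pvInnerF f a b aa bb p = pvInnerF g a b aa bb p := by
  intro f
  induction f with
  | zero => omega
  | succ f ih =>
    intro g a b aa bb p hf hg
    obtain ⟨g, rfl⟩ : ∃ g', g = g' + 1 := ⟨g - 1, by omega⟩
    simp only [pvInnerF]
    split
    · rfl
    · rename_i hp
      refine congrArg (fun f => List.flatMap f _) (funext fun d => ?_)
      split
      · rfl
      · split
        · refine congrArg (fun f => List.flatMap f _) (funext fun i => ?_)
          exact ih g a b _ _ _ (by have := floordiv_toNat_lt p hp; omega)
                               (by have := floordiv_toNat_lt p hp; omega)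
        · rfl

theorem pvInner_unfold (a b aa bb p : Int) :
    pvInner a b aa bb p =
      if p ≤ 1 then
        if a ≤ aa ∧ aa ≤ b then [aa] else []
      else
        (PySem.List.pyRange aa (bb + 1) p).flatMap (fun d =>
          if a ≤ d ∧ d + p - 1 ≤ b then [PySem.Int.floordiv d p]
          else if ¬(bb < a ∨ aa > b) then
            (PySem.List.pyRange 0 10 1).flatMap (fun i =>
              pvInner a b (d + PySem.Int.floordiv (i * p) 10)
                          (d + PySem.Int.floordiv ((i + 1) * p) 10 - 1)
                          (PySem.Int.floordiv p 10))
          else []) := by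
  show pvInnerF (p.toNat + 1) a b aa bb p = _
  simp only [pvInnerF]
  split
  · rfl
  · rename_i hp
    refine congrArg (fun f => List.flatMap f _) (funext fun d => ?_)
    split
    · rfl
    · split
      · refine congrArg (fun f => List.flatMap f _) (funext fun i => ?_)
        exact pvInnerF_irrel _ _ a b _ _ _ (by have := floordiv_toNat_lt p hp; omega)
                                           (by omega)
      · rfl

theorem floordiv_pow10_succ (e : Nat) :
    PySem.Int.floordiv ((10 : Int) ^ (e + 1)) 10 = 10 ^ e := by
  rw [PySem.Int.floordiv_eq_ediv_of_pos (by norm_num), pow_succ]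
  exact Int.mul_ediv_cancel _ (by norm_num)

-- pvFindS is unchanged when the upper bound is clipped at an aligned boundary c above lo,
-- and the found block never crosses c.
theorem pvFindS_min (e : Nat) : ∀ (hi c lo : Int), (10 : Int) ^ e ∣ c → lo < c →
    pvFindS hi lo ((10 : Int) ^ e) = pvFindS (min hi (c - 1)) lo ((10 : Int) ^ e) ∧
      lo + pvFindS hi lo ((10 : Int) ^ e) ≤ c := by
  induction e with
  | zero =>
    intro hi c lo _ hlo
    rw [pow_zero, pvFindS_unfold hi lo 1, pvFindS_unfold (min hi (c - 1)) lo 1,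
      if_pos (le_refl (1 : Int)), if_pos (le_refl (1 : Int))]
    exact ⟨rfl, by omega⟩
  | succ e ih =>
    intro hi c lo hc hlo
    have hs1 : ¬ ((10 : Int) ^ (e + 1) ≤ 1) := by have := pow10_succ_ge e; omega
    have hce : (10 : Int) ^ e ∣ c := dvd_trans (pow_dvd_pow 10 (Nat.le_succ e)) hc
    rw [pvFindS_unfold hi lo ((10 : Int) ^ (e + 1)),
      pvFindS_unfold (min hi (c - 1)) lo ((10 : Int) ^ (e + 1)), if_neg hs1, if_neg hs1]
    by_cases hm : PySem.Int.mod lo ((10 : Int) ^ (e + 1)) = 0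
    · have hdl : (10 : Int) ^ (e + 1) ∣ lo := (PySem.Int.mod_eq_zero_iff_dvd _ _).1 hm
      have hlsc : lo + 10 ^ (e + 1) ≤ c := by
        have hd : (10 : Int) ^ (e + 1) ∣ (c - lo) := dvd_sub hc hdl
        have := Int.le_of_dvd (by omega) hd
        omega
      by_cases hf : lo + 10 ^ (e + 1) - 1 ≤ hi
      · have hf' : lo + 10 ^ (e + 1) - 1 ≤ min hi (c - 1) := le_min hf (by omega)
        rw [if_pos ⟨hm, hf⟩, if_pos ⟨hm, hf'⟩]
        exact ⟨rfl, hlsc⟩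
      · have hf' : ¬ (lo + 10 ^ (e + 1) - 1 ≤ min hi (c - 1)) :=
          fun h => hf (le_trans h (min_le_left _ _))
        rw [if_neg (fun h => hf h.2), if_neg (fun h => hf' h.2), floordiv_pow10_succ]
        exact ih hi c lo hce hlo
    · rw [if_neg (fun h => hm h.1), if_neg (fun h => hm h.1), floordiv_pow10_succ]
      exact ih hi c lo hce hlo

-- the sweep splits at any aligned boundary c
theorem pvSweep_split (e : Nat) (hi c : Int) (hc : (10 : Int) ^ e ∣ c) :
    ∀ lo, lo ≤ c →
      pvSweep hi ((10 : Int) ^ e) lo =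
        pvSweep (min hi (c - 1)) ((10 : Int) ^ e) lo ++ pvSweep hi ((10 : Int) ^ e) c := by
  have hbase : pvSweep hi ((10 : Int) ^ e) c =
      pvSweep (min hi (c - 1)) ((10 : Int) ^ e) c ++ pvSweep hi ((10 : Int) ^ e) c := by
    rw [pvSweep_nil (show ¬ c ≤ min hi (c - 1) by have := min_le_right hi (c - 1); omega)]
    rfl
  have H : ∀ (n : Nat) (lo : Int), (c - lo).toNat ≤ n → lo ≤ c →
      pvSweep hi ((10 : Int) ^ e) lo =
        pvSweep (min hi (c - 1)) ((10 : Int) ^ e) lo ++ pvSweep hi ((10 : Int) ^ e) c := by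
    intro n
    induction n with
    | zero =>
      intro lo hn hle
      have : lo = c := by omega
      subst this
      exact hbase
    | succ n ih =>
      intro lo hn hle
      rcases eq_or_lt_of_le hle with rfl | hlt
      · exact hbase
      · by_cases hlb : lo ≤ hi
        · have hlb' : lo ≤ min hi (c - 1) := le_min hlb (by omega)
          obtain ⟨hfeq, hfle⟩ := pvFindS_min e hi c lo hc hlt
          have hs1 := pvFindS_one_le hi lo ((10 : Int) ^ e)
          rw [pvSweep_cons hlb, pvSweep_cons hlb', ← hfeq, List.cons_append]
          congr 1
          exact ih _ (by omega) hfle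
        · have h1 : ¬ lo ≤ min hi (c - 1) := by have := min_le_left hi (c - 1); omega
          have h2 : ¬ c ≤ hi := by omega
          rw [pvSweep_nil hlb, pvSweep_nil h1, pvSweep_nil h2]
          rfl
  exact fun lo hle => H (c - lo).toNat lo le_rfl hle

-- inside one 10^(e+1)-block that does not fit, the cap 10^(e+1) can be lowered to 10^e
theorem pvSweep_cap (e : Nat) (aa hi : Int) (haa : (10 : Int) ^ (e + 1) ∣ aa)
    (hhi : hi ≤ aa + 10 ^ (e + 1) - 1) :
    ∀ lo, aa ≤ lo → (lo = aa → hi < aa + 10 ^ (e + 1) - 1) →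
      pvSweep hi ((10 : Int) ^ (e + 1)) lo = pvSweep hi ((10 : Int) ^ e) lo := by
  have hs1 : ¬ ((10 : Int) ^ (e + 1) ≤ 1) := by have := pow10_succ_ge e; omega
  have key : ∀ lo, aa ≤ lo → lo ≤ hi → (lo = aa → hi < aa + 10 ^ (e + 1) - 1) →
      pvFindS hi lo ((10 : Int) ^ (e + 1)) = pvFindS hi lo ((10 : Int) ^ e) := by
    intro lo h1 h2 h3
    rw [pvFindS_unfold hi lo ((10 : Int) ^ (e + 1)), if_neg hs1]
    have hfail : ¬ (PySem.Int.mod lo ((10 : Int) ^ (e + 1)) = 0 ∧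
        lo + 10 ^ (e + 1) - 1 ≤ hi) := by
      rintro ⟨hm, hf⟩
      have hdl : (10 : Int) ^ (e + 1) ∣ lo := (PySem.Int.mod_eq_zero_iff_dvd _ _).1 hm
      have hd : (10 : Int) ^ (e + 1) ∣ (lo - aa) := dvd_sub hdl haa
      have heq : lo = aa := by
        by_contra hne
        have hpos : 0 < lo - aa := by omega
        have := Int.le_of_dvd hpos hd
        omega
      have := h3 heq
      omega
    rw [if_neg hfail, floordiv_pow10_succ]
  have H : ∀ (n : Nat) (lo : Int), (hi + 1 - lo).toNat ≤ n → aa ≤ lo →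
      (lo = aa → hi < aa + 10 ^ (e + 1) - 1) →
      pvSweep hi ((10 : Int) ^ (e + 1)) lo = pvSweep hi ((10 : Int) ^ e) lo := by
    intro n
    induction n with
    | zero =>
      intro lo hn h1 h2
      rw [pvSweep_nil (by omega), pvSweep_nil (by omega)]
    | succ n ih =>
      intro lo hn h1 h2
      by_cases hlb : lo ≤ hi
      · have hk := key lo h1 hlb h2
        have hs := pvFindS_one_le hi lo ((10 : Int) ^ (e + 1))
        rw [pvSweep_cons hlb, pvSweep_cons hlb, hk]
        congr 1
        rw [← hk]
        exact ih _ (by omega) (by omega) (by intro h; omega)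
      · rw [pvSweep_nil hlb, pvSweep_nil hlb]
  exact fun lo h1 h2 => H (hi + 1 - lo).toNat lo le_rfl h1 h2

-- per-block sweeps glue to the sweep of the union
theorem pvSweep_glue (e : Nat) (a b : Int) :
    ∀ (n : Nat) (aa : Int), (10 : Int) ^ e ∣ aa →
      (List.range n).flatMap (fun (i : Nat) =>
          pvSweep (min b (aa + ((i : Int) + 1) * 10 ^ e - 1)) ((10 : Int) ^ e)
            (max a (aa + (i : Int) * 10 ^ e))) =
        pvSweep (min b (aa + (n : Int) * 10 ^ e - 1)) ((10 : Int) ^ e) (max a aa) := by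
  intro n
  induction n with
  | zero =>
    intro aa _
    refine Eq.trans (by simp) ((pvSweep_nil ?_).symm)
    have h1 := min_le_right b (aa + ((0 : Nat) : Int) * 10 ^ e - 1)
    have h2 := le_max_right a aa
    have h3 : ((0 : Nat) : Int) * 10 ^ e = 0 := by push_cast; ring
    omega
  | succ n ih =>
    intro aa hdvd
    have hE : (0 : Int) < 10 ^ e := pow10_pos e
    have hnE : (0 : Int) ≤ (n : Int) * 10 ^ e := by positivity
    rw [List.range_succ, List.flatMap_append, ih aa hdvd]
    simp only [List.flatMap_cons, List.flatMap_nil, List.append_nil]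
    push_cast
    have hcd : (10 : Int) ^ e ∣ aa + (n : Int) * 10 ^ e := dvd_add hdvd (dvd_mul_left _ _)
    by_cases hac : a ≤ aa + (n : Int) * 10 ^ e
    · have hmaxle : max a aa ≤ aa + (n : Int) * 10 ^ e := max_le hac (by omega)
      rw [pvSweep_split e (min b (aa + ((n : Int) + 1) * 10 ^ e - 1)) (aa + (n : Int) * 10 ^ e)
        hcd (max a aa) hmaxle]
      have hmm : min (min b (aa + ((n : Int) + 1) * 10 ^ e - 1)) (aa + (n : Int) * 10 ^ e - 1) =
          min b (aa + (n : Int) * 10 ^ e - 1) := by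
        have hXY : aa + ((n : Int) + 1) * 10 ^ e - 1 = aa + (n : Int) * 10 ^ e + 10 ^ e - 1 := by
          ring
        omega
      rw [hmm, max_eq_right hac]
    · push_neg at hac
      have h1 : max a aa = a := max_eq_left (by omega)
      have h2 : max a (aa + (n : Int) * 10 ^ e) = a := max_eq_left (by omega)
      rw [h1, h2, pvSweep_nil (by have := min_le_right b (aa + (n : Int) * 10 ^ e - 1); omega)]
      rw [List.nil_append]

-- main correspondence: A's inner on an aligned run of k blocks of size 10^e equals
-- the greedy sweep of the clipped interval
theorem pvInner_eq_sweep (e : Nat) :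
    ∀ (a b aa : Int) (k : Nat), (10 : Int) ^ e ∣ aa → (e = 0 → k = 1) →
      pvInner a b aa (aa + (k : Int) * 10 ^ e - 1) ((10 : Int) ^ e) =
        pvSweep (min b (aa + (k : Int) * 10 ^ e - 1)) ((10 : Int) ^ e) (max a aa) := by
  induction e with
  | zero =>
    intro a b aa k _ hk0
    have hk : k = 1 := hk0 rfl
    subst hk
    have h1 : aa + ((1 : Nat) : Int) * 10 ^ 0 - 1 = aa := by push_cast; ring
    rw [h1, pvInner_unfold, pow_zero, if_pos (le_refl (1 : Int))]
    by_cases hcond : a ≤ aa ∧ aa ≤ b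
    · rw [if_pos hcond, max_eq_right hcond.1, min_eq_right hcond.2,
        pvSweep_cons (le_refl aa)]
      have hf : pvFindS aa aa 1 = 1 := by
        rw [pvFindS_unfold, if_pos (le_refl (1 : Int))]
      have hd1 : PySem.Int.floordiv aa 1 = aa := by
        rw [PySem.Int.floordiv_eq_ediv_of_pos one_pos]; exact Int.ediv_one aa
      rw [hf, hd1, pvSweep_nil (by omega)]
    · rw [if_neg hcond, pvSweep_nil ?_]
      by_cases h : a ≤ aa
      · have hb : ¬ aa ≤ b := fun hbb => hcond ⟨h, hbb⟩
        have h1 := min_le_left b aa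
        have h2 := le_max_right a aa
        omega
      · have h1 := min_le_right b aa
        have h2 := le_max_left a aa
        omega
  | succ e ih =>
    intro a b aa k hdvd _
    have hppos : (0 : Int) < 10 ^ (e + 1) := pow10_pos (e + 1)
    have hqpos : (0 : Int) < 10 ^ e := pow10_pos e
    have hp10 : (10 : Int) ≤ 10 ^ (e + 1) := pow10_succ_ge e
    have hp1 : ¬ ((10 : Int) ^ (e + 1) ≤ 1) := by omega
    have hpq : (10 : Int) ^ (e + 1) = 10 ^ e * 10 := pow_succ 10 e
    rw [pvInner_unfold, if_neg hp1]
    have hbb1 : aa + (k : Int) * 10 ^ (e + 1) - 1 + 1 = aa + (k : Int) * 10 ^ (e + 1) := by ring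
    rw [hbb1]
    have hrange : PySem.List.pyRange aa (aa + (k : Int) * 10 ^ (e + 1)) (10 ^ (e + 1)) =
        (List.range k).map (fun (j : Nat) => aa + 10 ^ (e + 1) * (j : Int)) := by
      rw [PySem.List.pyRange_of_pos _ _ hppos]
      by_cases hk0 : k = 0
      · subst hk0
        simp
      · have hkpos : (0 : Int) < (k : Int) := by exact_mod_cast Nat.pos_of_ne_zero hk0
        have hklt : aa < aa + (k : Int) * 10 ^ (e + 1) := by nlinarith
        rw [if_pos hklt]
        have harith : aa + (k : Int) * 10 ^ (e + 1) - aa + 10 ^ (e + 1) - 1 =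
            (10 ^ (e + 1) - 1) + (k : Int) * 10 ^ (e + 1) := by ring
        rw [harith, Int.add_mul_ediv_right _ _ (by omega : (10 : Int) ^ (e + 1) ≠ 0),
          Int.ediv_eq_zero_of_lt (by omega) (by omega)]
        simp
    rw [hrange, List.flatMap_map]
    by_cases hov : aa + (k : Int) * 10 ^ (e + 1) - 1 < a ∨ aa > b
    · -- the padded interval misses [a, b] entirely: every block yields nothing, sweep is empty
      rw [pvSweep_nil ?_]
      · refine List.flatMap_eq_nil_iff.2 ?_
        intro j hj
        have hjk : (j : Int) ≤ (k : Int) - 1 := by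
          have := List.mem_range.1 hj; omega
        have hjpos : (0 : Int) ≤ (j : Int) := by positivity
        have hfit : ¬ (a ≤ aa + 10 ^ (e + 1) * (j : Int) ∧
            aa + 10 ^ (e + 1) * (j : Int) + 10 ^ (e + 1) - 1 ≤ b) := by
          rintro ⟨hfa, hfb⟩
          have hub : 10 ^ (e + 1) * (j : Int) + 10 ^ (e + 1) ≤ (k : Int) * 10 ^ (e + 1) := by
            nlinarith
          rcases hov with h | h
          · omega
          · nlinarith
        rw [if_neg hfit, if_neg (not_not_intro hov)]
      · have h1 := min_le_left b (aa + (k : Int) * 10 ^ (e + 1) - 1)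
        have h2 := min_le_right b (aa + (k : Int) * 10 ^ (e + 1) - 1)
        have h3 := le_max_left a aa
        have h4 := le_max_right a aa
        omega
    · -- the padded interval meets [a, b]: every block equals its clipped greedy sweep
      refine Eq.trans (congrArg (fun f => List.flatMap f (List.range k)) (funext fun j => ?_))
        (pvSweep_glue (e + 1) a b k aa hdvd)
      have hdp : (10 : Int) ^ (e + 1) ∣ aa + 10 ^ (e + 1) * (j : Int) :=
        dvd_add hdvd (dvd_mul_right _ _)
      rw [show aa + ((j : Int) + 1) * 10 ^ (e + 1) - 1 =
            aa + 10 ^ (e + 1) * (j : Int) + 10 ^ (e + 1) - 1 by ring,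
          show aa + (j : Int) * 10 ^ (e + 1) = aa + 10 ^ (e + 1) * (j : Int) by ring]
      by_cases hfit : a ≤ aa + 10 ^ (e + 1) * (j : Int) ∧
          aa + 10 ^ (e + 1) * (j : Int) + 10 ^ (e + 1) - 1 ≤ b
      · rw [if_pos hfit, max_eq_right hfit.1, min_eq_right hfit.2,
          pvSweep_cons (by omega)]
        have hfp : pvFindS (aa + 10 ^ (e + 1) * (j : Int) + 10 ^ (e + 1) - 1)
            (aa + 10 ^ (e + 1) * (j : Int)) (10 ^ (e + 1)) = 10 ^ (e + 1) := by
          rw [pvFindS_unfold, if_neg hp1,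
            if_pos ⟨(PySem.Int.mod_eq_zero_iff_dvd _ _).2 hdp, by omega⟩]
        rw [hfp, pvSweep_nil (by omega)]
      · rw [if_neg hfit, if_pos (by exact hov)]
        have hchild : ∀ (i : Nat),
            pvInner a b (aa + 10 ^ (e + 1) * (j : Int) + PySem.Int.floordiv ((i : Int) * 10 ^ (e + 1)) 10)
              (aa + 10 ^ (e + 1) * (j : Int) + PySem.Int.floordiv (((i : Int) + 1) * 10 ^ (e + 1)) 10 - 1)
              (PySem.Int.floordiv (10 ^ (e + 1)) 10) =
            pvSweep (min b (aa + 10 ^ (e + 1) * (j : Int) + ((i : Int) + 1) * 10 ^ e - 1))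
              ((10 : Int) ^ e) (max a (aa + 10 ^ (e + 1) * (j : Int) + (i : Int) * 10 ^ e)) := by
          intro i
          have hi1 : PySem.Int.floordiv ((i : Int) * 10 ^ (e + 1)) 10 = (i : Int) * 10 ^ e := by
            rw [PySem.Int.floordiv_eq_ediv_of_pos (by norm_num), hpq,
              show (i : Int) * (10 ^ e * 10) = ((i : Int) * 10 ^ e) * 10 by ring,
              Int.mul_ediv_cancel _ (by norm_num)]
          have hi2 : PySem.Int.floordiv (((i : Int) + 1) * 10 ^ (e + 1)) 10 =
              ((i : Int) + 1) * 10 ^ e := by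
            rw [PySem.Int.floordiv_eq_ediv_of_pos (by norm_num), hpq,
              show ((i : Int) + 1) * (10 ^ e * 10) = (((i : Int) + 1) * 10 ^ e) * 10 by ring,
              Int.mul_ediv_cancel _ (by norm_num)]
          rw [hi1, hi2, floordiv_pow10_succ]
          have hq_dvd : (10 : Int) ^ e ∣ aa + 10 ^ (e + 1) * (j : Int) + (i : Int) * 10 ^ e :=
            dvd_add (dvd_trans (pow_dvd_pow 10 (Nat.le_succ e)) hdp) (dvd_mul_left _ _)
          have hres := ih a b (aa + 10 ^ (e + 1) * (j : Int) + (i : Int) * 10 ^ e) 1 hq_dvd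
            (fun _ => rfl)
          rw [show aa + 10 ^ (e + 1) * (j : Int) + (i : Int) * 10 ^ e + ((1 : Nat) : Int) * 10 ^ e - 1
              = aa + 10 ^ (e + 1) * (j : Int) + ((i : Int) + 1) * 10 ^ e - 1 by push_cast; ring] at hres
          exact hres
        rw [PySem.List.pyRange_one, show ((10 : Int) - 0).toNat = 10 from rfl, List.flatMap_map]
        refine Eq.trans (congrArg (fun f => List.flatMap f (List.range 10)) (funext fun i => ?_))
          (Eq.trans (pvSweep_glue e a b 10 (aa + 10 ^ (e + 1) * (j : Int)) (dvd_trans (pow_dvd_pow 10 (Nat.le_succ e)) hdp)) ?_)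
        · simp only [zero_add]
          exact hchild i
        · rw [show aa + 10 ^ (e + 1) * (j : Int) + ((10 : Nat) : Int) * 10 ^ e - 1 =
              aa + 10 ^ (e + 1) * (j : Int) + 10 ^ (e + 1) - 1 by push_cast; rw [hpq]; ring]
          refine (pvSweep_cap e (aa + 10 ^ (e + 1) * (j : Int))
            (min b (aa + 10 ^ (e + 1) * (j : Int) + 10 ^ (e + 1) - 1)) hdp
            (min_le_right _ _) (max a (aa + 10 ^ (e + 1) * (j : Int)))
            (le_max_right _ _) ?_).symm
          intro hmx
          have hax : a ≤ aa + 10 ^ (e + 1) * (j : Int) := max_eq_right_iff.1 hmx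
          have hnb : ¬ (aa + 10 ^ (e + 1) * (j : Int) + 10 ^ (e + 1) - 1 ≤ b) :=
            fun hb => hfit ⟨hax, hb⟩
          have := min_le_left b (aa + 10 ^ (e + 1) * (j : Int) + 10 ^ (e + 1) - 1)
          omega

-- str(n) length facts
theorem toDigitsCore_len_mono (b : Nat) :
    ∀ (f n : Nat) (l : List Char), l.length ≤ (Nat.toDigitsCore b f n l).length := by
  intro f
  induction f with
  | zero => intro n l; simp [Nat.toDigitsCore]
  | succ f ih =>
    intro n l
    simp only [Nat.toDigitsCore]
    split
    · simp
    · exact le_trans (by simp) (ih _ _)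

theorem toDigits10_len_pos (m : Nat) : 1 ≤ (Nat.toDigits 10 m).length := by
  simp only [Nat.toDigits, Nat.toDigitsCore]
  split
  · simp
  · exact le_trans (by simp) (toDigitsCore_len_mono 10 _ _ _)

theorem toDigits10_len_two (m : Nat) (hm : 10 ≤ m) : 2 ≤ (Nat.toDigits 10 m).length := by
  have h1 : ¬ (m / 10 = 0) := by omega
  simp only [Nat.toDigits, Nat.toDigitsCore]
  rw [if_neg h1]
  obtain ⟨fu, rfl⟩ : ∃ fu, m = fu + 1 := ⟨m - 1, by omega⟩
  simp only [Nat.toDigitsCore]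
  split
  · simp
  · exact le_trans (by simp) (toDigitsCore_len_mono 10 _ _ _)

theorem numLen_pos (n : Int) : 1 ≤ pvNumLen n := by
  unfold pvNumLen PySem.Int.toChars
  split
  · simp
  · exact le_trans (toDigits10_len_pos n.toNat) (le_refl _)

theorem numLen_eq_one (n : Int) (h : pvNumLen n = 1) : 0 ≤ n ∧ n ≤ 9 := by
  unfold pvNumLen PySem.Int.toChars at h
  by_cases hneg : n < 0
  · rw [if_pos hneg] at h
    simp only [List.length_cons] at h
    have := toDigits10_len_pos n.natAbs
    omega
  · rw [if_neg hneg] at h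
    push_neg at hneg
    refine ⟨hneg, ?_⟩
    by_contra h9
    push_neg at h9
    have h10 : 10 ≤ n.toNat := by omega
    have := toDigits10_len_two n.toNat h10
    omega

theorem numLen_small (n : Int) (h0 : 0 ≤ n) (h9 : n ≤ 9) : pvNumLen n = 1 := by
  interval_cases n <;> decide

theorem floordiv_one_int (x : Int) : PySem.Int.floordiv x 1 = x := by
  rw [PySem.Int.floordiv_eq_ediv_of_pos one_pos]; exact Int.ediv_one x

-- the one-digit (p = 1) entry case, used by the verdict and the tight claim
theorem entry_p_one (a b : Int) (hE : max (pvNumLen a) (pvNumLen b) - 1 = 0) :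
    range_to_prefix a b = if a ≤ b then [a] else [] := by
  unfold range_to_prefix pvP
  rw [hE, pow_zero, floordiv_one_int, floordiv_one_int, mul_one, mul_one]
  have hb : b + 1 - 1 = b := by ring
  rw [hb, pvInner_unfold, if_pos (le_refl (1 : Int))]
  by_cases hab : a ≤ b
  · rw [if_pos ⟨le_refl a, hab⟩, if_pos hab]
  · rw [if_neg (fun h => hab h.2), if_neg hab]

theorem sweep_p_one_cons (b lo : Int) (h : lo ≤ b) :
    pvSweep b 1 lo = lo :: pvSweep b 1 (lo + 1) := by
  have hf : pvFindS b lo 1 = 1 := by rw [pvFindS_unfold, if_pos (le_refl (1 : Int))]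
  rw [pvSweep_cons h, hf, floordiv_one_int]

theorem main_eq (a b : Int) (hnD : ¬ D_range_to_prefix a b) :
    range_to_prefix a b = range_to_prefix_alt a b := by
  rcases hEc : max (pvNumLen a) (pvNumLen b) - 1 with _ | e'
  · -- p = 1: both endpoints are single-character numbers
    rw [entry_p_one a b hEc]
    unfold range_to_prefix_alt pvP
    rw [hEc, pow_zero]
    rcases lt_trichotomy a b with hab | hab | hab
    · -- a < b with p = 1 would put (a, b) inside D
      exfalso
      have h1 := numLen_pos a
      have h2 := numLen_pos b
      have hla : pvNumLen a = 1 := by omega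
      have hlb : pvNumLen b = 1 := by omega
      obtain ⟨ha0, _⟩ := numLen_eq_one a hla
      obtain ⟨_, hb9⟩ := numLen_eq_one b hlb
      exact hnD ⟨ha0, hb9, hab⟩
    · subst hab
      rw [if_pos (le_refl a), sweep_p_one_cons a a (le_refl a), pvSweep_nil (by omega)]
    · rw [if_neg (by omega), pvSweep_nil (by omega)]
  · -- p = 10^(e'+1) ≥ 10
    unfold range_to_prefix range_to_prefix_alt pvP
    rw [hEc]
    have hppos : (0 : Int) < 10 ^ (e' + 1) := pow10_pos (e' + 1)
    have hfa : PySem.Int.floordiv a (10 ^ (e' + 1)) = a / 10 ^ (e' + 1) :=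
      PySem.Int.floordiv_eq_ediv_of_pos hppos
    have hfb : PySem.Int.floordiv b (10 ^ (e' + 1)) = b / 10 ^ (e' + 1) :=
      PySem.Int.floordiv_eq_ediv_of_pos hppos
    have hadm := Int.ediv_add_emod a (10 ^ (e' + 1))
    have hbdm := Int.ediv_add_emod b (10 ^ (e' + 1))
    have hadm2 : 10 ^ (e' + 1) * (a / 10 ^ (e' + 1)) = a / 10 ^ (e' + 1) * 10 ^ (e' + 1) :=
      mul_comm _ _
    have hbdm2 : 10 ^ (e' + 1) * (b / 10 ^ (e' + 1)) = b / 10 ^ (e' + 1) * 10 ^ (e' + 1) :=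
      mul_comm _ _
    have ham := Int.emod_nonneg a (ne_of_gt hppos)
    have hbm := Int.emod_nonneg b (ne_of_gt hppos)
    have ham' := Int.emod_lt_of_pos a hppos
    have hbm' := Int.emod_lt_of_pos b hppos
    have haa_le : a / 10 ^ (e' + 1) * 10 ^ (e' + 1) ≤ a := by omega
    have hbb_ge : b ≤ b / 10 ^ (e' + 1) * 10 ^ (e' + 1) + 10 ^ (e' + 1) - 1 := by omega
    rw [hfa, hfb]
    by_cases hk : a / 10 ^ (e' + 1) ≤ b / 10 ^ (e' + 1)
    · set k : Nat := (b / 10 ^ (e' + 1) - a / 10 ^ (e' + 1) + 1).toNat with hkdef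
      have hkcast : (k : Int) = b / 10 ^ (e' + 1) - a / 10 ^ (e' + 1) + 1 :=
        Int.toNat_of_nonneg (by omega)
      have hshape : b / 10 ^ (e' + 1) * 10 ^ (e' + 1) + 10 ^ (e' + 1) - 1 =
          a / 10 ^ (e' + 1) * 10 ^ (e' + 1) + (k : Int) * 10 ^ (e' + 1) - 1 := by
        rw [hkcast]; ring
      rw [hshape, pvInner_eq_sweep (e' + 1) a b _ k (dvd_mul_left _ _)
        (fun h => absurd h (Nat.succ_ne_zero e')),
        min_eq_left (by omega), max_eq_left haa_le]
    · push_neg at hk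
      have hab : b < a := by
        by_contra hcon
        push_neg at hcon
        exact absurd (Int.ediv_le_ediv hppos hcon) (by omega)
      rw [pvInner_unfold, if_neg (by have := pow10_succ_ge e'; omega)]
      have hr : PySem.List.pyRange (a / 10 ^ (e' + 1) * 10 ^ (e' + 1))
          (b / 10 ^ (e' + 1) * 10 ^ (e' + 1) + 10 ^ (e' + 1) - 1 + 1) (10 ^ (e' + 1)) = [] := by
        rw [PySem.List.pyRange_of_pos _ _ hppos, if_neg ?_]
        · simp
        · push_neg
          have h1 : b / 10 ^ (e' + 1) + 1 ≤ a / 10 ^ (e' + 1) := by omega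
          nlinarith [mul_le_mul_of_nonneg_right h1 (le_of_lt hppos)]
      rw [hr]
      rw [pvSweep_nil (by omega)]
      rfl

-- ===== VERDICT (by name: the statement is the Claim_ definition above) =====
theorem range_to_prefix_spec : Claim_unchanged_range_to_prefix := by
  intro a b _ hnD
  exact main_eq a b hnD

theorem range_to_prefix_changed : Claim_changed_range_to_prefix := by
  unfold Claim_changed_range_to_prefix; decide

theorem range_to_prefix_tight : Claim_exact_range_to_prefix := by
  intro a b _ hD
  obtain ⟨ha0, hb9, hab⟩ := hD
  have hla : pvNumLen a = 1 := numLen_small a ha0 (by omega)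
  have hlb : pvNumLen b = 1 := numLen_small b (by omega) hb9
  have hE : max (pvNumLen a) (pvNumLen b) - 1 = 0 := by rw [hla, hlb]; rfl
  rw [entry_p_one a b hE, if_pos (le_of_lt hab)]
  unfold range_to_prefix_alt pvP
  rw [hE, pow_zero, sweep_p_one_cons b a (by omega), sweep_p_one_cons b (a + 1) (by omega)]
  intro hcontra
  have := List.cons.injEq a [] a ((a + 1) :: pvSweep b 1 (a + 1 + 1)) ▸ hcontra
  simp at hcontra
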